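-- pv_equiv track=rewrite | github.com/malclifton/Python_and_Java_Projects | Assignment1.py | mostCommonWordLength
-- ===== SOURCE A (Python) =====
-- def mostCommonWordLength(list):
--      mcount=0
--      for i in range(len(list)):
--          count=0
--          for j in range(len(list)):
--              if len(list[j])==len(list[i]):
--                   count+=1
--                   if count>mcount:
--                       mcount = count
--      if mcount>1:
--           return mcount
--      else:
--          return -1
-- ===== SOURCE B (Python) =====
-- def mostCommonWordLength(list):
--     counts = {}
--     for length in [len(w) for w in list]:
--         counts[length] = counts.get(length, 0) + 1
--     best = max(counts.values(), default=0)
--     return best if best > 1 else -1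
-- ===== Notes on version B (the rewrite author's own statement) =====
-- stated objective: faster
-- what changed: Replaces A's quadratic nested rescan (for each word, recount all equal-length words) with a single pass that tallies length frequencies in a dict and then takes the max of the tallies.
import Mathlib
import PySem

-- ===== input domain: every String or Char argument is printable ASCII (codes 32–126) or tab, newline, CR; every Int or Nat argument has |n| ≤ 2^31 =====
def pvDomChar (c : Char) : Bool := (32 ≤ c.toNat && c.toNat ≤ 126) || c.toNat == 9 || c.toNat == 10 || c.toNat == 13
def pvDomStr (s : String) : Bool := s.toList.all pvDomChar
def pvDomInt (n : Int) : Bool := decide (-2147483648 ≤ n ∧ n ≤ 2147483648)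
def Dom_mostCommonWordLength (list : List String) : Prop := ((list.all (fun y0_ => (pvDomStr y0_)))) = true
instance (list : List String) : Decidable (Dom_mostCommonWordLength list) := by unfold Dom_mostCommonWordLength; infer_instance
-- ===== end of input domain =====

-- B replaces A's quadratic nested rescans with a single counting pass over a dict of
-- length frequencies (faster, asymptotically O(n) vs O(n^2)).


-- ===== PORT A =====
-- literal port: for i in range(len(list)): count=0; for j in range(len(list)):
--   if len(list[j])==len(list[i]): count+=1; if count>mcount: mcount=count
def mostCommonWordLength (list : List String) : Int :=
  let mcount : Int :=
    (PySem.List.pyRange 0 (PySem.List.len list)).foldl (fun mcount i =>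
      ((PySem.List.pyRange 0 (PySem.List.len list)).foldl (fun (s : Int × Int) j =>
        if PySem.Str.len (PySem.List.pyGetD list j "") = PySem.Str.len (PySem.List.pyGetD list i "") then
          let count := s.1 + 1
          (count, if count > s.2 then count else s.2)
        else s) ((0 : Int), mcount)).2) 0
  if mcount > 1 then mcount else -1

-- ===== PORT B =====
-- literal port of Source B: counts[len] = counts.get(len, 0) + 1; best = max(counts.values(), default=0)
def mostCommonWordLength_alt (list : List String) : Int :=
  let counts : PySem.Dict Int Int :=
    (list.map (fun w => PySem.Str.len w)).foldl
      (fun d length => d.insert length (d.getD length 0 + 1)) PySem.Dict.empty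
  let best := PySem.List.maxD counts.values (fun v => v) 0
  if best > 1 then best else -1

-- ===== PRECONDITION & SPEC =====
def Spec_mostCommonWordLength (list : List String) (out : Int) : Prop := out = mostCommonWordLength_alt list
instance (list : List String) (out : Int) : Decidable (Spec_mostCommonWordLength list out) := by unfold Spec_mostCommonWordLength; infer_instance

-- ===== CLAIM (what is proved, stated in full; the proofs are below) =====
def Claim_equal_mostCommonWordLength : Prop := ∀ (list : List String), Dom_mostCommonWordLength list → Spec_mostCommonWordLength list (mostCommonWordLength list)

-- ===== LEMMAS AND PROOFS =====

-- A's inner loop, folded over the already-projected lengths: it ends with the count of l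
-- and mcount updated to the max of the old mcount and every intermediate count.
theorem pv_inner (l : Int) (xs : List Int) (c m : Int) :
    xs.foldl (fun (s : Int × Int) x =>
        if x = l then
          let count := s.1 + 1
          (count, if count > s.2 then count else s.2)
        else s) (c, m)
      = (c + xs.count l, if xs.count l = 0 then m else max m (c + xs.count l)) := by
  induction xs generalizing c m with
  | nil => simp
  | cons x t ih =>
    simp only [List.foldl_cons]
    by_cases hx : x = l
    · subst hx
      rw [if_pos rfl, ih, List.count_cons_self]
      simp only [Prod.mk.injEq]
      push_cast
      refine ⟨by ring, ?_⟩
      split_ifs <;> omega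
    · rw [if_neg hx, ih, List.count_cons_of_ne hx]

-- running maxima started at 0 over lists with the same members agree
theorem pv_foldl_max_mem_iff (xs ys : List Int) (h : ∀ a, a ∈ xs ↔ a ∈ ys) :
    xs.foldl max 0 = ys.foldl max 0 := by
  have key : ∀ (us vs : List Int), (∀ a, a ∈ us → a ∈ vs) →
      us.foldl max 0 ≤ vs.foldl max 0 := by
    intro us vs huv
    rcases PySem.List.foldl_max_mem us 0 with h0 | hm
    · rw [h0]; exact (PySem.List.le_foldl_max vs 0).1
    · exact (PySem.List.le_foldl_max vs 0).2 _ (huv _ hm)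
  exact le_antisymm (key _ _ fun a => (h a).1) (key _ _ fun a => (h a).2)

-- ===== VERDICT (by name: the statement is the Claim_ definition above) =====
theorem mostCommonWordLength_spec : Claim_equal_mostCommonWordLength := by
  intro list _
  unfold Spec_mostCommonWordLength mostCommonWordLength mostCommonWordLength_alt
  set L : List Int := list.map (fun w => PySem.Str.len w) with hL
  show (if ((PySem.List.pyRange 0 (PySem.List.len list)).foldl (fun mcount i =>
      ((PySem.List.pyRange 0 (PySem.List.len list)).foldl (fun (s : Int × Int) j =>
        if PySem.Str.len (PySem.List.pyGetD list j "") = PySem.Str.len (PySem.List.pyGetD list i "") then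
          let count := s.1 + 1
          (count, if count > s.2 then count else s.2)
        else s) ((0 : Int), mcount)).2) 0) > 1 then _ else -1)
    = (if (PySem.List.maxD (PySem.Dict.values (L.foldl
        (fun d length => d.insert length (d.getD length 0 + 1)) PySem.Dict.empty)) (fun v => v) 0) > 1 then _ else -1)
  suffices hpre : ((PySem.List.pyRange 0 (PySem.List.len list)).foldl (fun mcount i =>
      ((PySem.List.pyRange 0 (PySem.List.len list)).foldl (fun (s : Int × Int) j =>
        if PySem.Str.len (PySem.List.pyGetD list j "") = PySem.Str.len (PySem.List.pyGetD list i "") then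
          let count := s.1 + 1
          (count, if count > s.2 then count else s.2)
        else s) ((0 : Int), mcount)).2) 0)
    = (PySem.List.maxD (PySem.Dict.values (L.foldl
        (fun d length => d.insert length (d.getD length 0 + 1)) PySem.Dict.empty)) (fun v => v) 0) by
    rw [hpre]
  -- A's outer loop over range(len(list)) is a fold over the words themselves
  rw [PySem.List.foldl_pyRange_zero_pyGetD list "" (f := fun (mcount : Int) (wi : String) =>
      ((PySem.List.pyRange 0 (PySem.List.len list)).foldl (fun (s : Int × Int) j =>
        if PySem.Str.len (PySem.List.pyGetD list j "") = PySem.Str.len wi then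
          let count := s.1 + 1
          (count, if count > s.2 then count else s.2)
        else s) ((0 : Int), mcount)).2) 0]
  -- each outer pass updates mcount to max mcount (count of that word's length)
  have hbody : ∀ (m : Int) (w : String), w ∈ list →
      ((PySem.List.pyRange 0 (PySem.List.len list)).foldl (fun (s : Int × Int) j =>
        if PySem.Str.len (PySem.List.pyGetD list j "") = PySem.Str.len w then
          let count := s.1 + 1
          (count, if count > s.2 then count else s.2)
        else s) ((0 : Int), m)).2 = max m (L.count (PySem.Str.len w) : Int) := by
    intro m w hw
    rw [PySem.List.foldl_pyRange_zero_pyGetD list "" (f := fun (s : Int × Int) (wj : String) =>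
        if PySem.Str.len wj = PySem.Str.len w then
          let count := s.1 + 1
          (count, if count > s.2 then count else s.2)
        else s) ((0 : Int), m)]
    rw [show (list.foldl (fun (s : Int × Int) wj =>
        if PySem.Str.len wj = PySem.Str.len w then
          let count := s.1 + 1
          (count, if count > s.2 then count else s.2)
        else s) ((0 : Int), m))
      = (L.foldl (fun (s : Int × Int) x =>
        if x = PySem.Str.len w then
          let count := s.1 + 1
          (count, if count > s.2 then count else s.2)
        else s) ((0 : Int), m)) from
      (List.foldl_map (f := fun (u : String) => PySem.Str.len u)
        (g := fun (s : Int × Int) x =>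
          if x = PySem.Str.len w then
            let count := s.1 + 1
            (count, if count > s.2 then count else s.2)
          else s) (l := list) (init := ((0 : Int), m))).symm]
    rw [pv_inner]
    have hmem : PySem.Str.len w ∈ L := hL ▸ List.mem_map_of_mem hw
    have hcnt : ¬ (L.count (PySem.Str.len w) = 0) :=
      fun h => (List.count_eq_zero.1 h) hmem
    rw [if_neg hcnt]
    simp
  rw [PySem.List.foldl_congr_mem (l := list) (init := (0 : Int))
      (f := fun (mcount : Int) (wi : String) =>
        ((PySem.List.pyRange 0 (PySem.List.len list)).foldl (fun (s : Int × Int) j =>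
          if PySem.Str.len (PySem.List.pyGetD list j "") = PySem.Str.len wi then
            let count := s.1 + 1
            (count, if count > s.2 then count else s.2)
          else s) ((0 : Int), mcount)).2)
      (g := fun (m : Int) (w : String) => max m (L.count (PySem.Str.len w) : Int))
      hbody]
  rw [show (list.foldl (fun (m : Int) (w : String) => max m (L.count (PySem.Str.len w) : Int)) 0)
      = (L.foldl (fun (m : Int) (x : Int) => max m (L.count x : Int)) 0) from
      (List.foldl_map (f := fun (u : String) => PySem.Str.len u)
        (g := fun (m : Int) (x : Int) => max m (L.count x : Int))
        (l := list) (init := (0 : Int))).symm]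
  rw [show (L.foldl (fun (m : Int) (x : Int) => max m (L.count x : Int)) 0)
      = ((L.map (fun x => (L.count x : Int))).foldl max 0) from
      (List.foldl_map (f := fun (x : Int) => (L.count x : Int))
        (g := fun (m v : Int) => max m v) (l := L) (init := (0 : Int))).symm]
  -- B's dict loop is Counter(L); its values are the frequencies of the distinct lengths
  rw [show (L.foldl (fun (d : PySem.Dict Int Int) length => d.insert length (d.getD length 0 + 1))
        PySem.Dict.empty) = PySem.Dict.counter L from
      PySem.Dict.foldl_insert_getD_add_one_eq_counter L]
  have hvals : (PySem.Dict.counter L).values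
      = (PySem.Set.ofList L).map (fun k => (L.count k : Int)) := by
    show ((PySem.Dict.counter L).items.map (·.2))
        = (PySem.Set.ofList L).map (fun k => (L.count k : Int))
    rw [PySem.Dict.items_counter, List.map_map]
    rfl
  rw [hvals]
  -- max(values, default=0) is the 0-started running max of the values
  have hmaxD : PySem.List.maxD ((PySem.Set.ofList L).map (fun k => (L.count k : Int)))
        (fun v => v) 0
      = ((PySem.Set.ofList L).map (fun k => (L.count k : Int))).foldl max 0 := by
    cases hS : (PySem.Set.ofList L).map (fun k => (L.count k : Int)) with
    | nil => simp [PySem.List.maxD, PySem.List.max?]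
    | cons v t =>
      have hv : 0 ≤ v := by
        have hvm : v ∈ (PySem.Set.ofList L).map (fun k => (L.count k : Int)) := by
          rw [hS]; exact List.mem_cons_self ..
        rcases List.mem_map.1 hvm with ⟨k, _, hk⟩
        simp [← hk]
      rw [show PySem.List.maxD (v :: t) (fun v => v) 0 = t.foldl max v by
        simp [PySem.List.maxD, PySem.List.max?_id_cons]]
      rw [List.foldl_cons, max_eq_right hv]
  rw [hmaxD]
  -- the two running maxima range over the same set of frequencies
  exact pv_foldl_max_mem_iff _ _ (by
    intro a
    constructor
    · intro h
      rcases List.mem_map.1 h with ⟨x, hx, rfl⟩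
      exact List.mem_map_of_mem ((PySem.Set.mem_ofList L x).2 hx)
    · intro h
      rcases List.mem_map.1 h with ⟨x, hx, rfl⟩
      exact List.mem_map_of_mem ((PySem.Set.mem_ofList L x).1 hx))
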